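-- pv_equiv track=rewrite | github.com/kabomekgwe/gospel-keys | backend/app/pipeline/lick_generator_engine.py | _invert_intervals
-- ===== SOURCE A (Python) =====
-- from typing import List, Dict, Optional, Tuple, Any
--
-- def _invert_intervals(intervals: Tuple[int, ...]) -> Tuple[int, ...]:
--     """Invert interval pattern (ascending <-> descending)"""
--     if not intervals:
--         return intervals
--
--     inverted = [intervals[0]]  # Keep root
--     for i in range(1, len(intervals)):
--         # Invert direction relative to previous note
--         prev_interval = intervals[i] - intervals[i-1]
--         inverted_interval = inverted[i-1] - prev_interval
--         inverted.append(inverted_interval)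
--
--     return tuple(inverted)
-- ===== SOURCE B (Python) =====
-- def _invert_intervals(intervals):
--     """Invert interval pattern (ascending <-> descending)"""
--     if not intervals:
--         return intervals
--     root = intervals[0]
--     return tuple(2 * root - x for x in intervals)
-- ===== Notes on version B (the rewrite author's own statement) =====
-- stated objective: simpler
-- what changed: Replaces the chained recurrence (each inverted note computed from the previous inverted note and the previous input note) with the closed form inverted[i] = 2*root - intervals[i], a single independent map over the input.
import Mathlib
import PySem

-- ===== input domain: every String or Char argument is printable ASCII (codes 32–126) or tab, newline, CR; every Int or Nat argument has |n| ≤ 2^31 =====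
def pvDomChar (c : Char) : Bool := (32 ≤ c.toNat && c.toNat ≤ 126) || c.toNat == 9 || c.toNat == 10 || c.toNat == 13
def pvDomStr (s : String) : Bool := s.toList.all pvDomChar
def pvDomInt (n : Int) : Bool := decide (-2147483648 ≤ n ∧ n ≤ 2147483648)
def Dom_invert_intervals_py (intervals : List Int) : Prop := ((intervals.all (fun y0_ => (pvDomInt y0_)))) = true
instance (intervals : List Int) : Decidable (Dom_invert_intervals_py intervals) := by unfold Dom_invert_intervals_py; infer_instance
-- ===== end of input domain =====

-- B computes each inverted note by the closed form 2*root - x instead of A's chained recurrence; objective: simpler.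

-- ===== PORT A =====
-- all list indices below are in range, so pyGetD is exact for Python's xs[i]
def invert_intervals_py (intervals : List Int) : List Int :=
  if intervals = [] then intervals
  else
    let inverted : List Int := [PySem.List.pyGetD intervals 0 0]
    (PySem.List.pyRange 1 intervals.length 1).foldl
      (fun inv i =>
        let prev_interval := PySem.List.pyGetD intervals i 0 - PySem.List.pyGetD intervals (i - 1) 0
        let inverted_interval := PySem.List.pyGetD inv (i - 1) 0 - prev_interval
        inv ++ [inverted_interval]) inverted

-- ===== PORT B =====
def invert_intervals_py_alt (intervals : List Int) : List Int :=
  match intervals with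
  | [] => intervals
  | root :: _ => intervals.map (fun x => 2 * root - x)

-- ===== PRECONDITION & SPEC =====
def Spec_invert_intervals_py (intervals : List Int) (out : List Int) : Prop := out = invert_intervals_py_alt intervals
instance (intervals : List Int) (out : List Int) : Decidable (Spec_invert_intervals_py intervals out) := by unfold Spec_invert_intervals_py; infer_instance

-- ===== CLAIM (what is proved, stated in full; the proofs are below) =====
def Claim_equal_invert_intervals_py : Prop := ∀ (intervals : List Int), Dom_invert_intervals_py intervals → Spec_invert_intervals_py intervals (invert_intervals_py intervals)

-- ===== LEMMAS AND PROOFS =====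

-- loop invariant: after processing range(1, k), the accumulator is the closed-form map of the first k elements
theorem invert_loop_invariant (a : List Int) (r : Int) (ha : a = r :: a.tail)
    (k : Nat) (hk1 : 1 ≤ k) (hk : k ≤ a.length) :
    (PySem.List.pyRange 1 (k : Int) 1).foldl
      (fun inv i =>
        let prev_interval := PySem.List.pyGetD a i 0 - PySem.List.pyGetD a (i - 1) 0
        let inverted_interval := PySem.List.pyGetD inv (i - 1) 0 - prev_interval
        inv ++ [inverted_interval]) [r]
    = (a.take k).map (fun x => 2 * r - x) := by
  induction k with
  | zero => omega
  | succ k ih =>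
    rcases Nat.lt_or_ge 1 (k + 1) with h1 | h1
    · have hk1' : 1 ≤ k := by omega
      have hkl : k < a.length := by omega
      have hsplit : (PySem.List.pyRange 1 ((k : Int) + 1) 1)
          = PySem.List.pyRange 1 (k : Int) 1 ++ [(k : Int)] := by
        apply PySem.List.pyRange_one_succ_right
        omega
      have := ih hk1' (by omega)
      push_cast
      rw [hsplit, List.foldl_append, this]
      simp only [List.foldl_cons, List.foldl_nil]
      have hlen : ((a.take k).map (fun x => 2 * r - x)).length = k := by
        simp [List.length_take, Nat.min_eq_left (le_of_lt hkl)]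
      have e1 : PySem.List.pyGetD a (k : Int) 0 = a[k] := by
        rw [PySem.List.pyGetD_natCast]
        simp [List.getD_eq_getElem?_getD, hkl]
      have hk1l : k - 1 < a.length := by omega
      have e2 : PySem.List.pyGetD a ((k : Int) - 1) 0 = a[k - 1] := by
        have : (k : Int) - 1 = ((k - 1 : Nat) : Int) := by omega
        rw [this, PySem.List.pyGetD_natCast]
        simp [List.getD_eq_getElem?_getD, hk1l]
      have hk1acc : k - 1 < ((a.take k).map (fun x => 2 * r - x)).length := by omega
      have e3 : PySem.List.pyGetD ((a.take k).map (fun x => 2 * r - x)) ((k : Int) - 1) 0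
          = 2 * r - a[k - 1] := by
        have hcast : (k : Int) - 1 = ((k - 1 : Nat) : Int) := by omega
        have hlt : k - 1 < k := by omega
        rw [hcast, PySem.List.pyGetD_natCast]
        simp [List.getD_eq_getElem?_getD, hlt, hk1l]
      rw [e1, e2, e3]
      have htake : (a.take (k + 1)) = a.take k ++ [a[k]] := by
        rw [List.take_add_one]
        simp [List.getElem?_eq_getElem hkl]
      rw [htake]
      simp only [List.map_append, List.map_cons, List.map_nil, List.append_cancel_left_eq,
        List.cons.injEq, and_true]
      ring
    · have hk0 : k = 0 := by omega
      subst hk0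
      have h2 : (PySem.List.pyRange 1 (((0 + 1 : Nat) : Int)) 1) = [] :=
        PySem.List.pyRange_one_eq_nil (by norm_num)
      rw [h2]
      rcases a with _ | ⟨x, xs⟩
      · simp at hk
      · simp at ha
        subst ha
        simp
        ring

-- ===== VERDICT (by name: the statement is the Claim_ definition above) =====
theorem invert_intervals_py_spec : Claim_equal_invert_intervals_py := by
  intro intervals _
  unfold Spec_invert_intervals_py invert_intervals_py invert_intervals_py_alt
  rcases intervals with _ | ⟨r, rest⟩
  · simp
  · simp only [if_neg (List.cons_ne_nil r rest)]
    have h0 : PySem.List.pyGetD (r :: rest) 0 0 = r := PySem.List.pyGetD_zero_cons r rest 0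
    rw [h0]
    have := invert_loop_invariant (r :: rest) r (by simp)
      (r :: rest).length (by simp) (le_refl _)
    simpa [List.take_length] using this
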